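-- pv_equiv track=rewrite | github.com/Helengendary/Eletronic-Fun-Kit | ProjetoFinal_IoT/max30100.py | detect_peaks
-- ===== SOURCE A (Python) =====
-- def detect_peaks(data, threshold, min_distance):
--     peaks = []
--     last_peak = -min_distance
--     for i in range(1, len(data) - 1):
--         if data[i] > threshold and data[i] > data[i-1] and data[i] > data[i+1]:
--             if i - last_peak >= min_distance:
--                 peaks.append(i)
--                 last_peak = i
--     return peaks
-- ===== SOURCE B (Python) =====
-- def detect_peaks(data, threshold, min_distance):
--     # sliding-window pass: local maxima above threshold, no index arithmetic into data
--     candidates = [i + 1 for i, (a, b, c) in enumerate(zip(data, data[1:], data[2:]))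
--                   if b > threshold and b > a and b > c]
--
--     def next_peak(j, last):
--         # advance the cursor past candidates closer than min_distance to last
--         while j < len(candidates) and candidates[j] - last < min_distance:
--             j += 1
--         return j
--
--     # skip-and-take selection: skip too-close candidates, take the next one, repeat
--     peaks = []
--     j = next_peak(0, -min_distance)
--     while j < len(candidates):
--         peaks.append(candidates[j])
--         j = next_peak(j + 1, candidates[j])
--     return peaks
-- ===== Notes on version B (the rewrite author's own statement) =====
-- stated objective: alternative
-- what changed: Replaces A's single index-based greedy loop by a sliding-window pass over zip(data, data[1:], data[2:]) (no index arithmetic into data) followed by a skip-and-take spacing selection (advance a cursor past too-close candidates, take the next, repeat) instead of an accumulator fold.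
import Mathlib
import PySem

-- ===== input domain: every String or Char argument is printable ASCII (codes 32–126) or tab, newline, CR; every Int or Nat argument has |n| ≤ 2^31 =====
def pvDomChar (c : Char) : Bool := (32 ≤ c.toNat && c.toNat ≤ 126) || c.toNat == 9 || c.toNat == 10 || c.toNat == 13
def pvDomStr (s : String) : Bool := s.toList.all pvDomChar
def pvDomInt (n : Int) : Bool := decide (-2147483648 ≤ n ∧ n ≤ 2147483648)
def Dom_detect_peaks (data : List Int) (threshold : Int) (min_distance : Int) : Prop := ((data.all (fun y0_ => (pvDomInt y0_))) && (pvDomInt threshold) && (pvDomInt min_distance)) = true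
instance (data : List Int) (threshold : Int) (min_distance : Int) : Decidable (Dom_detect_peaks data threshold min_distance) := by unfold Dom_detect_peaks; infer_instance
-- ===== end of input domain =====

-- B replaces A's fused greedy loop by a sliding-window zip pass (no index arithmetic into data) plus a recursive skip-and-take spacing selection; equal return value, no speed claim.


-- ===== PORT A =====
-- A: one fused loop over range(1, len(data)-1) carrying (peaks, last_peak).
def detect_peaks (data : List Int) (threshold : Int) (min_distance : Int) : List Int :=
  let st := (PySem.List.pyRange 1 ((data.length : Int) - 1) 1).foldl
    (fun (st : List Int × Int) i =>
      if PySem.List.pyGetD data i 0 > threshold ∧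
         PySem.List.pyGetD data i 0 > PySem.List.pyGetD data (i - 1) 0 ∧
         PySem.List.pyGetD data i 0 > PySem.List.pyGetD data (i + 1) 0 then
        if i - st.2 ≥ min_distance then (st.1 ++ [i], i) else st
      else st)
    ([], -min_distance)
  st.1

-- ===== PORT B =====
-- B helper, Source B's skip-and-take selection. Source B keeps a cursor j into the candidate
-- list; the port carries the suffix of candidates from j as a list, so Source B's inner
-- while ("advance j past too-close candidates") is dropWhile and the outer while
-- ("take candidates[j], continue after it") is the recursive call on the tail.
def selectPeaks (min_distance : Int) (cands : List Int) (last : Int) : List Int :=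
  match _h : cands.dropWhile (fun c => decide (c - last < min_distance)) with
  | [] => []
  | c :: rest => c :: selectPeaks min_distance rest c
termination_by cands.length
decreasing_by
  have hsub : (cands.dropWhile (fun c => decide (c - last < min_distance))).Sublist cands :=
    List.dropWhile_sublist _
  rw [_h] at hsub
  have := hsub.length_le
  simp at this
  omega

-- B: sliding-window candidate pass over zip(data, data[1:], data[2:]) (ported as nested
-- List.zip with List.drop; exact, the slices have nonnegative start and no stop),
-- then the recursive selection above.
def detect_peaks_alt (data : List Int) (threshold : Int) (min_distance : Int) : List Int :=
  let triples := (data.zip (data.drop 1)).zip (data.drop 2)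
  let candidates := (PySem.List.enumerate triples 0).filterMap
    (fun p => if p.2.1.2 > threshold ∧ p.2.1.2 > p.2.1.1 ∧ p.2.1.2 > p.2.2
              then some (p.1 + 1) else none)
  selectPeaks min_distance candidates (-min_distance)

-- ===== PRECONDITION & SPEC =====
def Spec_detect_peaks (data : List Int) (threshold : Int) (min_distance : Int) (out : List Int) : Prop := out = detect_peaks_alt data threshold min_distance
instance (data : List Int) (threshold : Int) (min_distance : Int) (out : List Int) : Decidable (Spec_detect_peaks data threshold min_distance out) := by unfold Spec_detect_peaks; infer_instance

-- ===== CLAIM (what is proved, stated in full; the proofs are below) =====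
def Claim_equal_detect_peaks : Prop := ∀ (data : List Int) (threshold : Int) (min_distance : Int), Dom_detect_peaks data threshold min_distance → Spec_detect_peaks data threshold min_distance (detect_peaks data threshold min_distance)

-- ===== LEMMAS AND PROOFS =====

theorem selectPeaks_nil (m last : Int) : selectPeaks m [] last = [] := by
  rw [selectPeaks]; rfl

theorem selectPeaks_cons (m last c : Int) (l : List Int) :
    selectPeaks m (c :: l) last =
      if c - last < m then selectPeaks m l last else c :: selectPeaks m l c := by
  by_cases hc : c - last < m
  · rw [selectPeaks, List.dropWhile_cons, if_pos (by simpa using hc), if_pos hc]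
    conv_rhs => rw [selectPeaks]
  · rw [selectPeaks, List.dropWhile_cons, if_neg (by simpa using hc), if_neg hc]

-- Fold fusion: folding a function that skips non-p elements equals folding over the filtered list.
theorem foldl_skip_eq_foldl_filter {α β : Type} (P : α → Prop) [DecidablePred P] (g : β → α → β)
    (l : List α) (init : β) :
    l.foldl (fun st x => if P x then g st x else st) init
      = (l.filter (fun x => decide (P x))).foldl g init := by
  induction l generalizing init with
  | nil => rfl
  | cons a l ih =>
    by_cases h : P a <;> simp [List.filter, h, ih]

-- Greedy accumulator fold over the candidate list = recursive skip-and-take selection.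
theorem foldl_greedy_eq_selectPeaks (m : Int) (l : List Int) (acc : List Int) (last : Int) :
    (l.foldl (fun (st : List Int × Int) c =>
        if c - st.2 ≥ m then (st.1 ++ [c], c) else st) (acc, last)).1
      = acc ++ selectPeaks m l last := by
  induction l generalizing acc last with
  | nil => simp [selectPeaks_nil]
  | cons c l ih =>
    rw [selectPeaks_cons]
    by_cases hc : c - last ≥ m
    · have : ¬ c - last < m := by omega
      simp [List.foldl_cons, hc, this, ih]
    · have : c - last < m := by omega
      simp [List.foldl_cons, hc, this, ih]


theorem map_filter_eq_filterMap {α β : Type} (f : α → β) (p : α → Bool) (l : List α) :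
    (l.filter p).map f = l.filterMap (fun x => if p x then some (f x) else none) := by
  induction l with
  | nil => rfl
  | cons a l ih => by_cases h : p a <;> simp [h, ih]

-- A's index-based candidate list equals B's sliding-window candidate list.
theorem candidates_eq (data : List Int) (threshold : Int) :
    (PySem.List.pyRange 1 ((data.length : Int) - 1) 1).filter
      (fun i => decide (PySem.List.pyGetD data i 0 > threshold ∧
                        PySem.List.pyGetD data i 0 > PySem.List.pyGetD data (i - 1) 0 ∧
                        PySem.List.pyGetD data i 0 > PySem.List.pyGetD data (i + 1) 0))
    = (PySem.List.enumerate ((data.zip (data.drop 1)).zip (data.drop 2)) 0).filterMap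
      (fun p => if p.2.1.2 > threshold ∧ p.2.1.2 > p.2.1.1 ∧ p.2.1.2 > p.2.2
                then some (p.1 + 1) else none) := by
  have hlen : ((data.zip (data.drop 1)).zip (data.drop 2)).length = data.length - 2 := by
    simp [List.length_zip]
    omega
  rw [PySem.List.enumerate_eq_map_pyRange (d := ((0, 0), 0)), List.filterMap_map,
      PySem.List.pyRange_one, PySem.List.pyRange_one, List.filterMap_map,
      List.filter_map, map_filter_eq_filterMap]
  simp only [PySem.List.len_eq, hlen]
  have hN : ((data.length : Int) - 1 - 1).toNat = (((data.length - 2 : Nat) : Int) - 0).toNat := by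
    omega
  rw [hN]
  apply List.filterMap_congr
  intro k hk
  simp only [List.mem_range] at hk
  simp only [Function.comp]
  have e0 : (1 : Int) + (k : Int) - 1 = ((k : Nat) : Int) := by ring
  have e2 : (1 : Int) + (k : Int) + 1 = ((k + 2 : Nat) : Int) := by push_cast; ring
  have e1 : (1 : Int) + (k : Int) = ((k + 1 : Nat) : Int) := by push_cast; ring
  have e3 : (0 : Int) + (k : Int) = ((k : Nat) : Int) := by ring
  have hb0 : k < data.length := by omega
  have hb1 : k + 1 < data.length := by omega
  have hb2 : k + 2 < data.length := by omega
  have hbt : k < ((data.zip (data.drop 1)).zip (data.drop 2)).length := by rw [hlen]; omega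
  have g0 : PySem.List.pyGetD data (1 + (k : Int) - 1) 0 = data[k] := by
    rw [e0, PySem.List.pyGetD_natCast, List.getD_eq_getElem _ _ hb0]
  have g2 : PySem.List.pyGetD data (1 + (k : Int) + 1) 0 = data[k + 2] := by
    rw [e2, PySem.List.pyGetD_natCast, List.getD_eq_getElem _ _ hb2]
  have g1 : PySem.List.pyGetD data (1 + (k : Int)) 0 = data[k + 1] := by
    rw [e1, PySem.List.pyGetD_natCast, List.getD_eq_getElem _ _ hb1]
  have gt : PySem.List.pyGetD ((data.zip (data.drop 1)).zip (data.drop 2)) (0 + (k : Int)) ((0, 0), 0)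
      = ((data[k], data[k + 1]), data[k + 2]) := by
    rw [e3, PySem.List.pyGetD_natCast, List.getD_eq_getElem _ _ hbt]
    simp [List.getElem_zip, List.getElem_drop, Nat.add_comm]
  simp only [g0, g2, g1, gt]
  have hout : (1 : Int) + (k : Nat) = (0 : Int) + (k : Nat) + 1 := by ring
  by_cases hC : data[k + 1] > threshold ∧ data[k + 1] > data[k] ∧ data[k + 1] > data[k + 2]
  · simp only [hC, hout]
    simp
  · simp only [hC]
    simp

-- ===== VERDICT (by name: the statement is the Claim_ definition above) =====
theorem detect_peaks_spec : Claim_equal_detect_peaks := by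
  intro data threshold min_distance _
  show detect_peaks data threshold min_distance = _
  simp only [detect_peaks, detect_peaks_alt]
  rw [foldl_skip_eq_foldl_filter, candidates_eq, foldl_greedy_eq_selectPeaks, List.nil_append]
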